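-- pv_equiv track=rewrite | github.com/vak2ve/frus-subject-taxonomy | scripts/apply_annotations.py | annotate_text_node
-- ===== SOURCE A (Python) =====
-- def annotate_text_node(text, vocab, sorted_terms):
--     """
--     Find all non-overlapping exact matches in a text string (longest first).
--
--     Returns list of tuples:
--       ('text', string)                  - plain text segment
--       ('rs', string, corresp, type)     - matched segment
--     """
--     if not text or not text.strip():
--         return [('text', text)]
--
--     matches = []
--     used = set()
--
--     for term in sorted_terms:
--         if len(term) > len(text):
--             continue
--         start = 0
--         while True:
--             idx = text.find(term, start)
--             if idx == -1:
--                 break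
--             end = idx + len(term)
--             # Check no overlap with existing matches
--             if not any(i in used for i in range(idx, end)):
--                 # Word boundary check
--                 before_ok = (idx == 0 or not text[idx - 1].isalnum())
--                 after_ok = (end == len(text) or not text[end].isalnum())
--                 if before_ok and after_ok:
--                     matches.append((idx, end, term))
--                     used.update(range(idx, end))
--             start = idx + 1
--
--     if not matches:
--         return [('text', text)]
--
--     matches.sort(key=lambda x: x[0])
--
--     segments = []
--     pos = 0
--     for start, end, term in matches:
--         if start > pos:
--             segments.append(('text', text[pos:start]))
--         corresp, rs_type = vocab[term]
--         segments.append(('rs', term, corresp, rs_type))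
--         pos = end
--     if pos < len(text):
--         segments.append(('text', text[pos:]))
--
--     return segments
-- ===== SOURCE B (Python) =====
-- def annotate_text_node(text, vocab, sorted_terms):
--     """
--     Alternative implementation: for each distinct term length, one sliding-window
--     pass over the text collects every occurrence of every term of that length via
--     a hash-set lookup; then the terms are processed in the given priority order,
--     accepted matches being kept as a disjoint interval list sorted by start
--     (insertion point by binary search), so there is no per-character 'used' set,
--     no repeated text.find scan, and no final sort.
--     """
--     if not text or not text.strip():
--         return [("text", text)]
--
--     n = len(text)
--     lengths = list(dict.fromkeys(len(t) for t in sorted_terms if t and len(t) <= n))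
--     occ = {}  # term -> increasing list of start positions
--     for L in lengths:
--         term_set = set(t for t in sorted_terms if len(t) == L)
--         for k in range(n - L + 1):
--             w = text[k:k + L]
--             if w in term_set:
--                 occ.setdefault(w, []).append(k)
--
--     chosen = []  # disjoint (start, end, term) triples, kept sorted by start
--     for term in sorted_terms:
--         for i in occ.get(term, ()):
--             end = i + len(term)
--             if (i == 0 or not text[i - 1].isalnum()) and (end == n or not text[end].isalnum()):
--                 lo, hi = 0, len(chosen)
--                 while lo < hi:
--                     mid = (lo + hi) // 2
--                     if chosen[mid][0] < i:
--                         lo = mid + 1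
--                     else:
--                         hi = mid
--                 if (lo == len(chosen) or end <= chosen[lo][0]) and (lo == 0 or chosen[lo - 1][1] <= i):
--                     chosen.insert(lo, (i, end, term))
--
--     if not chosen:
--         return [("text", text)]
--
--     segments = []
--     pos = 0
--     for start, end, term in chosen:
--         if start > pos:
--             segments.append(("text", text[pos:start]))
--         corresp, rs_type = vocab[term]
--         segments.append(("rs", term, corresp, rs_type))
--         pos = end
--     if pos < n:
--         segments.append(("text", text[pos:]))
--     return segments
-- ===== Notes on version B (the rewrite author's own statement) =====
-- stated objective: faster
-- what changed: B replaces A's repeated text.find scans, per-character 'used' set with an O(match length) overlap scan per candidate, and final sort by a per-length sliding-window hash-set pass that collects all occurrences up front plus a disjoint interval list kept sorted by start with binary-search insertion, so each overlap test is O(log m) and no final sort is needed.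
import Mathlib
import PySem

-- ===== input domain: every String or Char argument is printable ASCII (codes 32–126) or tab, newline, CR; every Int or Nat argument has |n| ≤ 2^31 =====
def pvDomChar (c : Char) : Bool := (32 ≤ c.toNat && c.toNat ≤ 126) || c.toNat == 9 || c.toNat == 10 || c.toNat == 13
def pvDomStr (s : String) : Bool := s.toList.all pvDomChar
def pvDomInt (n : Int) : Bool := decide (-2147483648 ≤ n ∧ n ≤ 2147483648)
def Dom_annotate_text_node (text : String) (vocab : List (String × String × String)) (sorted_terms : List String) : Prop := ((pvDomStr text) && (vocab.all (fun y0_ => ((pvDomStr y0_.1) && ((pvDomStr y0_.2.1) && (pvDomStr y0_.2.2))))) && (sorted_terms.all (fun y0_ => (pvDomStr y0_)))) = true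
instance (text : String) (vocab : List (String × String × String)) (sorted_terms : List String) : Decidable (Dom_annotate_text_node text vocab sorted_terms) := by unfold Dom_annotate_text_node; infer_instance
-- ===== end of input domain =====

-- B replaces A's repeated text.find scans + per-character 'used' set + final sort by a
-- per-length sliding-window hash-set collection of occurrences and a sorted disjoint
-- interval list with binary-search insertion (objective: alternative).

-- ===== PORT A =====
-- word-boundary checks, identical expressions in both Python versions
def pvBefore (t : List Char) (i : Int) : Bool :=
  i == 0 || !((PySem.List.pyGet? t (i - 1)).elim false PySem.Chars.isalnum)

def pvAfter (t : List Char) (e : Int) : Bool :=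
  e == (t.length : Int) || !((PySem.List.pyGet? t e).elim false PySem.Chars.isalnum)

-- vocab[term]; none = KeyError in Python, excluded by Pre_ (the .getD value is never used there)
def pvLookup (vocab : List (String × String × String)) (term : String) : String × String :=
  ((PySem.Dict.mk vocab).get? term).getD ("", "")

-- the final segment-emission loop, literally identical in Source A and Source B
def pvEmit (text : String) (vocab : List (String × String × String))
    (ms : List (Int × Int × String)) : List (List String) :=
  let st := ms.foldl (fun (st : List (List String) × Int) m =>
    let segs := if st.2 < m.1 then st.1 ++ [["text", PySem.Str.slice text (some st.2) (some m.1)]] else st.1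
    let c := pvLookup vocab m.2.2
    (segs ++ [["rs", m.2.2, c.1, c.2]], m.2.1)) ([], 0)
  if st.2 < (PySem.Str.len text : Int) then st.1 ++ [["text", PySem.Str.slice text (some st.2) none]] else st.1

-- facts about text.find(term, start) needed for the while-loop's termination
theorem pvFindFrom_facts (s sub : List Char) (k : Nat)
    (h : PySem.Chars.findFrom s sub (k : Int) none ≠ -1) :
    0 ≤ PySem.Chars.findFrom s sub (k : Int) none ∧
      k ≤ (PySem.Chars.findFrom s sub (k : Int) none).toNat ∧
      (PySem.Chars.findFrom s sub (k : Int) none).toNat ≤ s.length := by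
  have hfind1 := PySem.Chars.neg_one_le_find (List.drop k s) sub
  have hfind2 := PySem.Chars.find_le_length (List.drop k s) sub
  simp only [PySem.Chars.findFrom] at h ⊢
  have hk0 : ¬ ((k : Int) < 0) := by omega
  rw [if_neg hk0] at h ⊢
  simp only [Int.toNat_natCast, List.take_length] at h ⊢
  by_cases h1 : (s.length : Int) < (k : Int)
  · rw [if_pos h1] at h; exact absurd rfl h
  · rw [if_neg h1] at h ⊢
    by_cases h2 : PySem.Chars.find (List.drop k s) sub = -1
    · rw [if_pos h2] at h; exact absurd rfl h
    · rw [if_neg h2] at h ⊢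
      simp only [List.length_drop] at hfind2
      omega

-- A's inner 'while True' loop
def pvAWhile (t term : List Char) (ms : List (Int × Int × String)) (used : PySem.Set Int)
    (start : Nat) : List (Int × Int × String) × PySem.Set Int :=
  if h : PySem.Chars.findFrom t term (start : Int) none = -1 then (ms, used)
  else
    let idx := PySem.Chars.findFrom t term (start : Int) none
    let e : Int := idx + (term.length : Int)
    if (PySem.List.pyRange idx e).any used.contains then
      pvAWhile t term ms used (idx.toNat + 1)
    else
      if pvBefore t idx && pvAfter t e then
        pvAWhile t term (ms ++ [(idx, e, String.ofList term)]) (used.update (PySem.List.pyRange idx e)) (idx.toNat + 1)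
      else pvAWhile t term ms used (idx.toNat + 1)
  termination_by t.length + 1 - start
  decreasing_by all_goals (obtain ⟨-, h1, h2⟩ := pvFindFrom_facts t term start h; omega)

def annotate_text_node (text : String) (vocab : List (String × String × String))
    (sorted_terms : List String) : List (List String) :=
  if text = "" ∨ PySem.Str.strip text = "" then [["text", text]]
  else
    let res := sorted_terms.foldl
      (fun (st : List (Int × Int × String) × PySem.Set Int) term =>
        if term.toList.length > text.toList.length then st
        else pvAWhile text.toList term.toList st.1 st.2 0)
      ([], PySem.Set.empty)
    if res.1 = [] then [["text", text]]
    else pvEmit text vocab (PySem.List.sorted res.1 (fun m => m.1))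

-- ===== PORT B =====
-- Python's hand-rolled 'while lo < hi' binary search ((lo+hi)//2 on nonnegative ints is Nat division)
def pvBisect (chosen : List (Int × Int × String)) (i : Int) (lo hi : Nat) : Nat :=
  if _h : lo < hi then
    if (chosen.getD ((lo + hi) / 2) (0, 0, "")).1 < i then pvBisect chosen i ((lo + hi) / 2 + 1) hi
    else pvBisect chosen i lo ((lo + hi) / 2)
  else lo
  termination_by hi - lo
  decreasing_by all_goals omega

-- binary search + conditional chosen.insert(lo, ...) from Source B's inner loop
def pvInsertMatch (chosen : List (Int × Int × String)) (i e : Int) (term : String) :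
    List (Int × Int × String) :=
  let lo := pvBisect chosen i 0 chosen.length
  if (lo == chosen.length || decide (e ≤ (chosen.getD lo (0, 0, "")).1)) &&
      (lo == 0 || decide ((chosen.getD (lo - 1) (0, 0, "")).2.1 ≤ i)) then
    PySem.List.insert chosen (lo : Int) (i, e, term)
  else chosen

def annotate_text_node_alt (text : String) (vocab : List (String × String × String))
    (sorted_terms : List String) : List (List String) :=
  if text = "" ∨ PySem.Str.strip text = "" then [["text", text]]
  else
    let t := text.toList
    let n := t.length
    let lengths := PySem.List.dedup
      ((sorted_terms.filter (fun s => !(s == "") && decide (s.toList.length ≤ n))).map (fun s => s.toList.length))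
    let occ := lengths.foldl (fun occ L =>
        let termSet := PySem.Set.ofList (sorted_terms.filter (fun s => s.toList.length == L))
        (List.range (n - L + 1)).foldl (fun occ (k : Nat) =>
            let w := String.ofList (PySem.List.slice t (some (k : Int)) (some ((k : Int) + (L : Int))))
            if termSet.contains w then occ.modify w [] (fun ps => ps ++ [(k : Int)]) else occ)
          occ)
      (PySem.Dict.mk ([] : List (String × List Int)))
    let chosen := sorted_terms.foldl (fun chosen term =>
        (occ.getD term []).foldl (fun chosen i =>
            let e := i + (term.toList.length : Int)
            if pvBefore t i && pvAfter t e then pvInsertMatch chosen i e term else chosen)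
          chosen)
      ([] : List (Int × Int × String))
    if chosen = [] then [["text", text]]
    else pvEmit text vocab chosen

-- ===== PRECONDITION & SPEC =====
-- does term occur somewhere in t with both word boundaries satisfied?
def pvHasBOcc (t term : List Char) : Bool :=
  (List.range (t.length + 1)).any (fun k =>
    decide (term <+: t.drop k) && pvBefore t (k : Int) && pvAfter t ((k : Int) + (term.length : Int)))

-- Pre_ admits every blank text; otherwise it excludes (a) sorted_terms containing the empty
-- string — zero-width matches are a degenerate corner: A emits zero-width 'rs' segments, B
-- ignores the empty term — and (b) inputs where some term with a word-bounded occurrence is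
-- not a key of vocab: there A either raises KeyError (the occurrence is matched) or, when all
-- such occurrences are overlapped by earlier matches, returns a value on which B agrees.
def Pre_annotate_text_node (text : String) (vocab : List (String × String × String))
    (sorted_terms : List String) : Prop :=
  text = "" ∨ PySem.Str.strip text = "" ∨
    (∀ term ∈ sorted_terms, term ≠ "" ∧
      (pvHasBOcc text.toList term.toList = true → (vocab.any (fun v => v.1 == term)) = true))
instance (text : String) (vocab : List (String × String × String)) (sorted_terms : List String) : Decidable (Pre_annotate_text_node text vocab sorted_terms) := by unfold Pre_annotate_text_node; infer_instance

def pvWitness_annotate_text_node : String × (List (String × String × String)) × List String :=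
  ("ab cd x", [("ab", ("A1", "topical")), ("cd", ("C1", "geo"))], ["ab", "cd"])

def Spec_annotate_text_node (text : String) (vocab : List (String × String × String)) (sorted_terms : List String) (out : List (List String)) : Prop := out = annotate_text_node_alt text vocab sorted_terms
instance (text : String) (vocab : List (String × String × String)) (sorted_terms : List String) (out : List (List String)) : Decidable (Spec_annotate_text_node text vocab sorted_terms out) := by unfold Spec_annotate_text_node; infer_instance

-- ===== CLAIM (what is proved, stated in full; the proofs are below) =====
def Claim_equal_annotate_text_node : Prop := ∀ (text : String) (vocab : List (String × String × String)) (sorted_terms : List String), Dom_annotate_text_node text vocab sorted_terms → Pre_annotate_text_node text vocab sorted_terms → Spec_annotate_text_node text vocab sorted_terms (annotate_text_node text vocab sorted_terms)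

-- ===== LEMMAS AND PROOFS =====

theorem pvWitness_ok :
    Dom_annotate_text_node pvWitness_annotate_text_node.1 pvWitness_annotate_text_node.2.1 pvWitness_annotate_text_node.2.2 ∧
    Pre_annotate_text_node pvWitness_annotate_text_node.1 pvWitness_annotate_text_node.2.1 pvWitness_annotate_text_node.2.2 := by
  decide

-- ---- candidate positions and A's loop as a fold over them ----
def pvCandFrom (t term : List Char) (s : Nat) : List Nat :=
  (List.range (t.length + 1)).filter (fun k => decide (s ≤ k) && decide (term <+: t.drop k))

def pvStepA (t term : List Char) (st : List (Int × Int × String) × PySem.Set Int) (k : Nat) :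
    List (Int × Int × String) × PySem.Set Int :=
  if (PySem.List.pyRange (k : Int) ((k : Int) + (term.length : Int))).any st.2.contains then st
  else if pvBefore t (k : Int) && pvAfter t ((k : Int) + (term.length : Int)) then
    (st.1 ++ [((k : Int), (k : Int) + (term.length : Int), String.ofList term)],
      st.2.update (PySem.List.pyRange (k : Int) ((k : Int) + (term.length : Int))))
  else st

theorem pvFilter_split (n s j : Nat) (P : Nat → Bool) (hj : j < n) (hsj : s ≤ j) (hPj : P j = true)
    (hmin : ∀ k, s ≤ k → k < j → P k = false) :
    (List.range n).filter (fun k => decide (s ≤ k) && P k)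
      = j :: (List.range n).filter (fun k => decide (j + 1 ≤ k) && P k) := by
  have hsplit : n = (j + 1) + (n - (j + 1)) := by omega
  rw [hsplit, List.range_add, List.filter_append, List.filter_append]
  have h1 : (List.range (j + 1)).filter (fun k => decide (s ≤ k) && P k) = [j] := by
    rw [List.range_succ, List.filter_append]
    have he : (List.range j).filter (fun k => decide (s ≤ k) && P k) = [] := by
      rw [List.filter_eq_nil_iff]
      intro k hk
      simp only [List.mem_range] at hk
      by_cases hks : s ≤ k
      · simp [hmin k hks hk]
      · simp [hks]
    rw [he]
    simp [hsj, hPj]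
  have h2 : (List.range (j + 1)).filter (fun k => decide (j + 1 ≤ k) && P k) = [] := by
    rw [List.filter_eq_nil_iff]
    intro k hk
    simp only [List.mem_range] at hk
    simp only [Bool.and_eq_true, decide_eq_true_eq, not_and]
    intro hc
    omega
  have h3 : ((List.range (n - (j + 1))).map (fun x => (j + 1) + x)).filter (fun k => decide (s ≤ k) && P k)
      = ((List.range (n - (j + 1))).map (fun x => (j + 1) + x)).filter (fun k => decide (j + 1 ≤ k) && P k) := by
    apply List.filter_congr
    intro k hk
    simp only [List.mem_map] at hk
    obtain ⟨x, -, rfl⟩ := hk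
    have hx1 : s ≤ j + 1 + x := by omega
    have hx2 : j + 1 ≤ j + 1 + x := by omega
    simp [hx1, hx2]
  rw [h1, h2, h3]
  simp

theorem pvCandFrom_eq_nil (t term : List Char) (s : Nat)
    (h : PySem.Chars.findFrom t term (s : Int) none = -1) : pvCandFrom t term s = [] := by
  rw [pvCandFrom, List.filter_eq_nil_iff]
  intro k hk
  simp only [List.mem_range] at hk
  simp only [Bool.and_eq_true, decide_eq_true_eq, not_and]
  intro hsk hpre
  by_cases hs : s ≤ t.length
  · rw [PySem.Chars.findFrom_natCast_eq_neg_one_iff t term s hs] at h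
    apply h
    have hdd : t.drop k = (t.drop s).drop (k - s) := by
      rw [List.drop_drop]
      congr 1
      omega
    rw [hdd] at hpre
    exact hpre.isInfix.trans (List.drop_suffix _ _).isInfix
  · omega

theorem pvAWhile_eq_foldl (t term : List Char) (ms : List (Int × Int × String)) (u : PySem.Set Int)
    (s : Nat) : pvAWhile t term ms u s = (pvCandFrom t term s).foldl (pvStepA t term) (ms, u) := by
  refine pvAWhile.induct t term
    (motive := fun ms u s => pvAWhile t term ms u s = (pvCandFrom t term s).foldl (pvStepA t term) (ms, u))
    ?_ ?_ ?_ ?_ ms u s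
  case _ =>
    intro ms u s h
    rw [pvAWhile, dif_pos h, pvCandFrom_eq_nil t term s h]
    rfl
  case _ =>
    intro ms u s h idx e hany ih
    have hidx : idx = PySem.Chars.findFrom t term ↑s := rfl
    have he : e = idx + ↑term.length := rfl
    clear_value idx e
    subst he
    subst hidx
    obtain ⟨hf0, hf1, hf2⟩ := pvFindFrom_facts t term s h
    have hspec := PySem.Chars.findFrom_natCast_spec t term s (by omega) h
    have hcast : PySem.Chars.findFrom t term (s : Int) none
        = ((PySem.Chars.findFrom t term (s : Int) none).toNat : Int) := by omega
    rw [pvAWhile, dif_neg h, if_pos hany, ih]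
    rw [show pvCandFrom t term s
        = (PySem.Chars.findFrom t term (s : Int) none).toNat :: pvCandFrom t term ((PySem.Chars.findFrom t term (s : Int) none).toNat + 1) from
      pvFilter_split _ s _ _ (by omega) hf1 (by simp [hspec.2.1]) (by
        intro k hks hkj
        simp only [decide_eq_false_iff_not]
        exact hspec.2.2 k hks hkj)]
    rw [List.foldl_cons]
    congr 1
    rw [pvStepA, if_pos (by rw [← hcast]; exact hany)]
  case _ =>
    intro ms u s h idx e hany hbd ih
    have hidx : idx = PySem.Chars.findFrom t term ↑s := rfl
    have he : e = idx + ↑term.length := rfl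
    clear_value idx e
    subst he
    subst hidx
    obtain ⟨hf0, hf1, hf2⟩ := pvFindFrom_facts t term s h
    have hspec := PySem.Chars.findFrom_natCast_spec t term s (by omega) h
    have hcast : PySem.Chars.findFrom t term (s : Int) none
        = ((PySem.Chars.findFrom t term (s : Int) none).toNat : Int) := by omega
    rw [pvAWhile, dif_neg h, if_neg hany, if_pos hbd, ih]
    rw [show pvCandFrom t term s
        = (PySem.Chars.findFrom t term (s : Int) none).toNat :: pvCandFrom t term ((PySem.Chars.findFrom t term (s : Int) none).toNat + 1) from
      pvFilter_split _ s _ _ (by omega) hf1 (by simp [hspec.2.1]) (by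
        intro k hks hkj
        simp only [decide_eq_false_iff_not]
        exact hspec.2.2 k hks hkj)]
    rw [List.foldl_cons]
    congr 1
    rw [pvStepA, if_neg (by rw [← hcast]; exact hany), if_pos (by rw [← hcast]; exact hbd)]
    rw [← hcast]
  case _ =>
    intro ms u s h idx e hany hbd ih
    have hidx : idx = PySem.Chars.findFrom t term ↑s := rfl
    have he : e = idx + ↑term.length := rfl
    clear_value idx e
    subst he
    subst hidx
    obtain ⟨hf0, hf1, hf2⟩ := pvFindFrom_facts t term s h
    have hspec := PySem.Chars.findFrom_natCast_spec t term s (by omega) h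
    have hcast : PySem.Chars.findFrom t term (s : Int) none
        = ((PySem.Chars.findFrom t term (s : Int) none).toNat : Int) := by omega
    rw [pvAWhile, dif_neg h, if_neg hany, if_neg hbd, ih]
    rw [show pvCandFrom t term s
        = (PySem.Chars.findFrom t term (s : Int) none).toNat :: pvCandFrom t term ((PySem.Chars.findFrom t term (s : Int) none).toNat + 1) from
      pvFilter_split _ s _ _ (by omega) hf1 (by simp [hspec.2.1]) (by
        intro k hks hkj
        simp only [decide_eq_false_iff_not]
        exact hspec.2.2 k hks hkj)]
    rw [List.foldl_cons]
    congr 1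
    rw [pvStepA, if_neg (by rw [← hcast]; exact hany), if_neg (by rw [← hcast]; exact hbd)]

-- ---- B's occurrence dictionary: per-term characterization ----
def pvOccStep (terms : List String) (t : List Char) (occ : PySem.Dict String (List Int)) (L : Nat) :
    PySem.Dict String (List Int) :=
  let termSet := PySem.Set.ofList (terms.filter (fun s => s.toList.length == L))
  (List.range (t.length - L + 1)).foldl (fun occ (k : Nat) =>
      let w := String.ofList (PySem.List.slice t (some (k : Int)) (some ((k : Int) + (L : Int))))
      if termSet.contains w then occ.modify w [] (fun ps => ps ++ [(k : Int)]) else occ)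
    occ

def pvLengths (terms : List String) (n : Nat) : List Nat :=
  PySem.List.dedup ((terms.filter (fun s => !(s == "") && decide (s.toList.length ≤ n))).map (fun s => s.toList.length))

theorem pvOfList_eq_iff (xs : List Char) (c : String) : String.ofList xs = c ↔ xs = c.toList := by
  constructor
  · intro h; rw [← h, String.toList_ofList]
  · intro h; rw [h, String.ofList_toList]

theorem pvWin_eq (t : List Char) (L k : Nat) :
    PySem.List.slice t (some (k : Int)) (some ((k : Int) + (L : Int))) = (t.drop k).take L := by
  have h : ((k : Int) + (L : Int)) = ((k + L : Nat) : Int) := by push_cast; ring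
  rw [h, PySem.List.slice_natCast]
  congr 1
  omega

theorem pvFoldl_modify_if_getD {κ : Type} [BEq κ] [LawfulBEq κ] (l : List Nat) (p : Nat → Bool)
    (w : Nat → κ) (g : Nat → Int) (d : PySem.Dict κ (List Int)) (c : κ) :
    (l.foldl (fun occ k => if p k then occ.modify (w k) [] (fun ps => ps ++ [g k]) else occ) d).getD c []
      = d.getD c [] ++ ((l.filter (fun k => p k && (w k == c))).map g) := by
  induction l generalizing d with
  | nil => simp
  | cons k l ih =>
    rw [List.foldl_cons, List.filter_cons]
    by_cases hp : p k = true
    · rw [if_pos hp, ih]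
      have hone := PySem.Dict.getD_foldl_modify_append [(w k, g k)] d c
      rw [List.foldl_cons, List.foldl_nil] at hone
      rw [hone]
      by_cases hw : (w k == c) = true
      · simp [hp, hw]
      · simp [hp, hw]
    · simp only [Bool.not_eq_true] at hp
      rw [if_neg (by simp [hp]), ih, hp]
      simp

theorem pvOccStep_getD (terms : List String) (t : List Char) (L : Nat)
    (hLn : L ≤ t.length) (occ0 : PySem.Dict String (List Int)) (c : String) :
    (pvOccStep terms t occ0 L).getD c []
      = occ0.getD c [] ++
        (if c.toList.length = L ∧ c ∈ terms then
          ((List.range (t.length - L + 1)).filter (fun k => decide (c.toList <+: t.drop k))).map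
            (fun (k : Nat) => (k : Int))
        else []) := by
  rw [pvOccStep]
  simp only []
  rw [pvFoldl_modify_if_getD (List.range (t.length - L + 1))
    (fun k => (PySem.Set.ofList (terms.filter (fun s => s.toList.length == L))).contains
      (String.ofList (PySem.List.slice t (some (k : Int)) (some ((k : Int) + (L : Int))))))
    (fun k => String.ofList (PySem.List.slice t (some (k : Int)) (some ((k : Int) + (L : Int)))))
    (fun k => (k : Int)) occ0 c]
  congr 1
  by_cases hc : c.toList.length = L ∧ c ∈ terms
  · rw [if_pos hc]
    refine congrArg _ (List.filter_congr ?_)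
    intro k hk
    simp only [List.mem_range] at hk
    have hkL : k + L ≤ t.length := by omega
    have hwin : PySem.List.slice t (some (k : Int)) (some ((k : Int) + (L : Int))) = (t.drop k).take L :=
      pvWin_eq t L k
    by_cases hw : ((t.drop k).take L) = c.toList
    · have hcontains : (PySem.Set.ofList (terms.filter (fun s => s.toList.length == L))).contains
          (String.ofList ((t.drop k).take L)) = true := by
        rw [PySem.Set.contains_iff, PySem.Set.mem_ofList, hw, String.ofList_toList, List.mem_filter]
        exact ⟨hc.2, by simp [hc.1]⟩
      have hbeq : (String.ofList ((t.drop k).take L) == c) = true := by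
        simp [hw]
      have hpre : c.toList <+: t.drop k := by
        rw [List.prefix_iff_eq_take, hc.1, hw]
      simp only [hwin, hcontains, hbeq]
      simp [hpre]
    · have hbeq : (String.ofList ((t.drop k).take L) == c) = false := by
        simp only [beq_eq_false_iff_ne, ne_eq, pvOfList_eq_iff]
        exact hw
      have hpre : ¬ (c.toList <+: t.drop k) := by
        rw [List.prefix_iff_eq_take, hc.1]
        exact fun h => hw h.symm
      simp [hwin, hbeq, hpre]
  · rw [if_neg hc]
    simp only [List.map_eq_nil_iff, List.filter_eq_nil_iff]
    intro k hk
    simp only [List.mem_range] at hk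
    have hkL : k + L ≤ t.length := by omega
    rw [pvWin_eq t L k]
    simp only [Bool.and_eq_true, not_and]
    intro hcontains hbeq
    rw [beq_iff_eq, pvOfList_eq_iff] at hbeq
    apply hc
    have hclen : c.toList.length = L := by
      rw [← hbeq]
      simp
      omega
    refine ⟨hclen, ?_⟩
    rw [PySem.Set.contains_iff, PySem.Set.mem_ofList, List.mem_filter] at hcontains
    have := hcontains.1
    rwa [(pvOfList_eq_iff _ _).mpr hbeq] at this

theorem pvCandFrom_zero_shift (t c : List Char) (h2 : c.length ≤ t.length) :
    pvCandFrom t c 0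
      = (List.range (t.length - c.length + 1)).filter (fun k => decide (c <+: t.drop k)) := by
  rw [pvCandFrom]
  rw [show t.length + 1 = (t.length - c.length + 1) + c.length by omega, List.range_add,
    List.filter_append]
  have hzero : ∀ k : Nat, (decide (0 ≤ k) && decide (c <+: t.drop k)) = decide (c <+: t.drop k) := by
    intro k; simp
  rw [show ((List.range (t.length - c.length + 1)).filter fun k => decide (0 ≤ k) && decide (c <+: t.drop k))
      = ((List.range (t.length - c.length + 1)).filter fun k => decide (c <+: t.drop k)) from
    List.filter_congr (fun k _ => hzero k)]
  have hnil : (((List.range c.length).map (fun x => t.length - c.length + 1 + x)).filter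
      fun k => decide (0 ≤ k) && decide (c <+: t.drop k)) = [] := by
    rw [List.filter_eq_nil_iff]
    intro k hk
    simp only [List.mem_map] at hk
    obtain ⟨x, hx, rfl⟩ := hk
    simp only [List.mem_range] at hx
    simp only [Bool.and_eq_true, decide_eq_true_eq, not_and]
    intro _ hpre
    have := hpre.length_le
    simp only [List.length_drop] at this
    omega
  rw [hnil, List.append_nil]

theorem pvOccFold_getD (terms : List String) (t : List Char) (ls : List Nat)
    (hls : ∀ L ∈ ls, L ≤ t.length) (hnd : ls.Nodup) (occ0 : PySem.Dict String (List Int))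
    (c : String) (hc : c ∈ terms) :
    (ls.foldl (pvOccStep terms t) occ0).getD c []
      = occ0.getD c [] ++
        (if c.toList.length ∈ ls then
          ((List.range (t.length - c.toList.length + 1)).filter
            (fun k => decide (c.toList <+: t.drop k))).map (fun (k : Nat) => (k : Int))
        else []) := by
  induction ls generalizing occ0 with
  | nil => simp
  | cons L ls ih =>
    rw [List.foldl_cons, ih (fun L' hL' => hls L' (by simp [hL']))
      (by exact (List.nodup_cons.mp hnd).2)]
    rw [pvOccStep_getD terms t L (hls L (by simp)) occ0 c]
    by_cases hLc : c.toList.length = L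
    · subst hLc
      have hnotin : ¬ c.toList.length ∈ ls := (List.nodup_cons.mp hnd).1
      rw [if_pos ⟨rfl, hc⟩, if_neg hnotin, List.append_nil, if_pos (List.mem_cons_self)]
    · rw [if_neg (fun h => hLc h.1), List.append_nil]
      by_cases hin : c.toList.length ∈ ls
      · rw [if_pos hin, if_pos (List.mem_cons_of_mem _ hin)]
      · rw [if_neg hin, if_neg (by simp only [List.mem_cons]; rintro (h | h) <;> [exact hLc h; exact hin h])]

theorem pvOcc_getD (terms : List String) (t : List Char) (term : String) (hmem : term ∈ terms)
    (hne : term ≠ "") :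
    ((pvLengths terms t.length).foldl (pvOccStep terms t) (PySem.Dict.mk [])).getD term []
      = if term.toList.length ≤ t.length then (pvCandFrom t term.toList 0).map (fun (k : Nat) => (k : Int))
        else [] := by
  have hbound : ∀ L ∈ pvLengths terms t.length, L ≤ t.length := by
    intro L hL
    rw [pvLengths, PySem.List.mem_dedup] at hL
    simp only [List.mem_map, List.mem_filter, Bool.and_eq_true, decide_eq_true_eq] at hL
    obtain ⟨s, ⟨-, -, hsl⟩, rfl⟩ := hL
    exact hsl
  rw [pvOccFold_getD terms t _ hbound (by rw [pvLengths]; exact PySem.List.nodup_dedup _)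
    (PySem.Dict.mk []) term hmem]
  by_cases hle : term.toList.length ≤ t.length
  · have hin : term.toList.length ∈ pvLengths terms t.length := by
      rw [pvLengths, PySem.List.mem_dedup]
      simp only [List.mem_map, List.mem_filter]
      refine ⟨term, ⟨hmem, ?_⟩, rfl⟩
      simp only [Bool.and_eq_true, Bool.not_eq_eq_eq_not, decide_eq_true_eq]
      constructor
      · simp [hne]
      · simpa using hle
    rw [if_pos hle, if_pos hin]
    rw [pvCandFrom_zero_shift t term.toList hle]
    rfl
  · have hnotin : ¬ term.toList.length ∈ pvLengths terms t.length := by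
      intro hin
      exact hle (hbound _ hin)
    rw [if_neg hle, if_neg hnotin]
    rfl

-- ---- the greedy selection invariant ----
def pvStepB (t : List Char) (term : String) (chosen : List (Int × Int × String)) (k : Nat) :
    List (Int × Int × String) :=
  if pvBefore t (k : Int) && pvAfter t ((k : Int) + (term.toList.length : Int)) then
    pvInsertMatch chosen (k : Int) ((k : Int) + (term.toList.length : Int)) term
  else chosen

def pvInv (ms : List (Int × Int × String)) (u : PySem.Set Int) (c : List (Int × Int × String)) : Prop :=
  c.Perm ms ∧ c.Pairwise (fun a b => a.2.1 ≤ b.1) ∧ (∀ x ∈ c, 0 ≤ x.1 ∧ x.1 < x.2.1) ∧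
    (∀ i : Int, u.contains i = true ↔ ∃ x ∈ ms, x.1 ≤ i ∧ i < x.2.1)

theorem pvBisect_main (c : List (Int × Int × String)) (i : Int)
    (hs : c.Pairwise (fun a b => a.1 < b.1)) :
    ∀ (lo hi : Nat), lo ≤ hi → hi ≤ c.length →
      (∀ j (_ : j < c.length), j < lo → (c.getD j (0, 0, "")).1 < i) →
      (∀ j (_ : j < c.length), hi ≤ j → i ≤ (c.getD j (0, 0, "")).1) →
      (lo ≤ pvBisect c i lo hi ∧ pvBisect c i lo hi ≤ hi ∧
        (∀ j (_ : j < c.length), j < pvBisect c i lo hi → (c.getD j (0, 0, "")).1 < i) ∧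
        (∀ j (_ : j < c.length), pvBisect c i lo hi ≤ j → i ≤ (c.getD j (0, 0, "")).1)) := by
  intro lo hi
  induction lo, hi using pvBisect.induct c i with
  | case1 lo hi hlt hmid ih =>
    intro hlohi hhi hbelow habove
    rw [pvBisect, dif_pos hlt, if_pos hmid]
    have hmlt : (lo + hi) / 2 < c.length := by omega
    have hnext : ∀ j (_ : j < c.length), j < (lo + hi) / 2 + 1 → (c.getD j (0, 0, "")).1 < i := by
      intro j hj hjm
      rcases Nat.lt_or_ge j ((lo + hi) / 2) with hlt' | hge
      · have h1 := List.pairwise_iff_getElem.mp hs j ((lo + hi) / 2) hj hmlt hlt'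
        rw [List.getD_eq_getElem c _ hj]
        rw [List.getD_eq_getElem c (0, 0, "") hmlt] at hmid
        omega
      · have : j = (lo + hi) / 2 := by omega
        subst this
        exact hmid
    have := ih (by omega) hhi hnext habove
    exact ⟨by omega, this.2.1, this.2.2⟩
  | case2 lo hi hlt hmid ih =>
    intro hlohi hhi hbelow habove
    rw [pvBisect, dif_pos hlt, if_neg hmid]
    have hmlt : (lo + hi) / 2 < c.length := by omega
    have hnext : ∀ j (_ : j < c.length), (lo + hi) / 2 ≤ j → i ≤ (c.getD j (0, 0, "")).1 := by
      intro j hj hjm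
      rcases Nat.lt_or_ge ((lo + hi) / 2) j with hlt' | hge
      · have h1 := List.pairwise_iff_getElem.mp hs ((lo + hi) / 2) j hmlt hj hlt'
        rw [List.getD_eq_getElem c _ hj]
        rw [List.getD_eq_getElem c (0, 0, "") hmlt] at hmid
        omega
      · have : j = (lo + hi) / 2 := by omega
        subst this
        omega
    have := ih (by omega) (by omega) hbelow hnext
    exact ⟨this.1, by omega, this.2.2⟩
  | case3 lo hi hlt =>
    intro hlohi hhi hbelow habove
    rw [pvBisect, dif_neg hlt]
    exact ⟨le_refl _, by omega, hbelow, fun j hj hge => habove j hj (by omega)⟩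

theorem pvPairwise_lt (c : List (Int × Int × String))
    (hpair : c.Pairwise (fun a b => a.2.1 ≤ b.1)) (hpos : ∀ x ∈ c, x.1 < x.2.1) :
    c.Pairwise (fun a b => a.1 < b.1) := by
  rw [List.pairwise_iff_getElem] at hpair ⊢
  intro a b ha hb hab
  have h1 := hpair a b ha hb hab
  have h2 := hpos _ (List.getElem_mem ha)
  omega

theorem pvCond_iff_noOverlap (c : List (Int × Int × String)) (i e : Int) (hie : i < e)
    (hpair : c.Pairwise (fun a b => a.2.1 ≤ b.1)) (hpos : ∀ x ∈ c, x.1 < x.2.1) :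
    (((pvBisect c i 0 c.length == c.length) ||
        decide (e ≤ (c.getD (pvBisect c i 0 c.length) (0, 0, "")).1)) &&
      ((pvBisect c i 0 c.length == 0) ||
        decide ((c.getD (pvBisect c i 0 c.length - 1) (0, 0, "")).2.1 ≤ i))) = true
      ↔ ¬ ∃ x ∈ c, x.1 < e ∧ i < x.2.1 := by
  have hs := pvPairwise_lt c hpair hpos
  obtain ⟨hlo0, hlole, hbelow, habove⟩ := pvBisect_main c i hs 0 c.length (by omega) (le_refl _)
    (by omega) (by omega)
  set lo := pvBisect c i 0 c.length with hlodef
  simp only [Bool.and_eq_true, Bool.or_eq_true, beq_iff_eq, decide_eq_true_eq]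
  constructor
  · rintro ⟨hleft, hright⟩ ⟨x, hx, hxe, hxi⟩
    obtain ⟨j, hj, rfl⟩ := List.mem_iff_getElem.mp hx
    rcases Nat.lt_or_ge j lo with hjlo | hjlo
    · rcases hright with h0 | hend
      · omega
      · rcases Nat.lt_or_ge j (lo - 1) with hj1 | hj1
        · have hloc : lo - 1 < c.length := by omega
          have h1 := List.pairwise_iff_getElem.mp hpair j (lo - 1) hj hloc hj1
          have h2 := hbelow (lo - 1) hloc (by omega)
          rw [List.getD_eq_getElem c _ hloc] at h2
          omega
        · have hj2 : j = lo - 1 := by omega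
          subst hj2
          rw [List.getD_eq_getElem c _ hj] at hend
          omega
    · rcases hleft with hlen | hstart
      · omega
      · have hloc : lo < c.length := by omega
        rw [List.getD_eq_getElem c _ hloc] at hstart
        rcases Nat.lt_or_ge lo j with hlt' | hge
        · have h2 := List.pairwise_iff_getElem.mp hs lo j hloc hj hlt'
          omega
        · have hj2 : j = lo := by omega
          subst hj2
          omega
  · intro hno
    constructor
    · rcases Nat.eq_or_lt_of_le hlole with heq | hlt
      · exact Or.inl heq
      · right
        by_contra hcon
        push Not at hcon
        have hi1 := habove lo hlt (le_refl _)
        have hpos2 := hpos _ (List.getElem_mem hlt)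
        rw [List.getD_eq_getElem c _ hlt] at hi1 hcon
        exact hno ⟨_, List.getElem_mem hlt, by omega, by omega⟩
    · rcases Nat.eq_zero_or_pos lo with h0 | hpos'
      · exact Or.inl h0
      · right
        by_contra hcon
        push Not at hcon
        have hloc : lo - 1 < c.length := by omega
        have h1 := hbelow (lo - 1) hloc (by omega)
        rw [List.getD_eq_getElem c _ hloc] at h1 hcon
        exact hno ⟨_, List.getElem_mem hloc, by omega, by omega⟩

theorem pvAny_overlap_iff (u : PySem.Set Int) (ms : List (Int × Int × String))
    (hu : ∀ i', u.contains i' = true ↔ ∃ x ∈ ms, x.1 ≤ i' ∧ i' < x.2.1) (i e : Int)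
    (hie : i < e) (hpos : ∀ x ∈ ms, x.1 < x.2.1) :
    ((PySem.List.pyRange i e).any u.contains = true) ↔ ∃ x ∈ ms, x.1 < e ∧ i < x.2.1 := by
  rw [List.any_eq_true]
  constructor
  · rintro ⟨j, hj, hc⟩
    rw [PySem.List.mem_pyRange_one] at hj
    obtain ⟨x, hx, hx1, hx2⟩ := (hu j).mp hc
    exact ⟨x, hx, by omega, by omega⟩
  · rintro ⟨x, hx, hx1, hx2⟩
    have h3 := hpos x hx
    refine ⟨max i x.1, ?_, ?_⟩
    · rw [PySem.List.mem_pyRange_one]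
      rcases max_choice i x.1 with hm | hm <;> rw [hm] <;> omega
    · rw [hu]
      refine ⟨x, hx, ?_, ?_⟩ <;> rcases max_choice i x.1 with hm | hm <;> rw [hm] <;> omega

theorem pvLen_pos (term : String) (hne : term ≠ "") : 1 ≤ term.toList.length := by
  rcases Nat.eq_zero_or_pos term.toList.length with h | h
  · exfalso
    apply hne
    have h2 : term.toList = [] := List.eq_nil_of_length_eq_zero h
    rw [← String.ofList_toList (s := term), h2]
  · exact h

theorem pvStep_pres (t : List Char) (term : String) (hne : term ≠ "") (k : Nat)
    (ms : List (Int × Int × String)) (u : PySem.Set Int) (c : List (Int × Int × String))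
    (hinv : pvInv ms u c) :
    pvInv (pvStepA t term.toList (ms, u) k).1 (pvStepA t term.toList (ms, u) k).2
      (pvStepB t term c k) := by
  obtain ⟨hperm, hpair, hpos, hu⟩ := hinv
  have hlen1 : (1 : Int) ≤ (term.toList.length : Int) := by exact_mod_cast pvLen_pos term hne
  have hie : ((k : Int)) < (k : Int) + (term.toList.length : Int) := by omega
  have hposc : ∀ x ∈ c, x.1 < x.2.1 := fun x hx => (hpos x hx).2
  have hcond := pvCond_iff_noOverlap c (k : Int) ((k : Int) + (term.toList.length : Int)) hie
    hpair hposc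
  have hposms : ∀ x ∈ ms, x.1 < x.2.1 := fun x hx => (hpos x (hperm.mem_iff.mpr hx)).2
  have hany := pvAny_overlap_iff u ms hu (k : Int) ((k : Int) + (term.toList.length : Int)) hie
    hposms
  have hexiff : (∃ x ∈ ms, x.1 < (k : Int) + (term.toList.length : Int) ∧ (k : Int) < x.2.1)
      ↔ (∃ x ∈ c, x.1 < (k : Int) + (term.toList.length : Int) ∧ (k : Int) < x.2.1) := by
    constructor <;> rintro ⟨x, hx, h⟩
    · exact ⟨x, hperm.mem_iff.mpr hx, h⟩
    · exact ⟨x, hperm.mem_iff.mp hx, h⟩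
  rw [pvStepA, pvStepB]
  by_cases hov : (PySem.List.pyRange (k : Int) ((k : Int) + (term.toList.length : Int))).any
      u.contains = true
  · rw [if_pos hov]
    have hex : ∃ x ∈ c, x.1 < (k : Int) + (term.toList.length : Int) ∧ (k : Int) < x.2.1 :=
      hexiff.mp (hany.mp hov)
    by_cases hbd : (pvBefore t (k : Int) && pvAfter t ((k : Int) + (term.toList.length : Int))) = true
    · rw [if_pos hbd, pvInsertMatch]
      simp only []
      rw [if_neg (fun hc => (hcond.mp hc) hex)]
      exact ⟨hperm, hpair, hpos, hu⟩
    · rw [if_neg hbd]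
      exact ⟨hperm, hpair, hpos, hu⟩
  · rw [if_neg hov]
    have hnoex : ¬ ∃ x ∈ c, x.1 < (k : Int) + (term.toList.length : Int) ∧ (k : Int) < x.2.1 :=
      fun hx => hov (hany.mpr (hexiff.mpr hx))
    by_cases hbd : (pvBefore t (k : Int) && pvAfter t ((k : Int) + (term.toList.length : Int))) = true
    · rw [if_pos hbd, if_pos hbd, pvInsertMatch]
      simp only []
      have hcondtrue := hcond.mpr hnoex
      rw [if_pos hcondtrue]
      -- decompose the insertion condition
      obtain ⟨hlo0, hlole, hbelow, habove⟩ :=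
        pvBisect_main c (k : Int) (pvPairwise_lt c hpair hposc) 0 c.length (by omega) (le_refl _)
          (by omega) (by omega)
      simp only [Bool.and_eq_true, Bool.or_eq_true, beq_iff_eq, decide_eq_true_eq] at hcondtrue
      obtain ⟨hleft, hright⟩ := hcondtrue
      rw [String.ofList_toList]
      rw [PySem.List.insert_natCast c (pvBisect c (k : Int) 0 c.length)
        ((k : Int), (k : Int) + (term.toList.length : Int), term) hlole]
      set lo := pvBisect c (k : Int) 0 c.length with hlodef
      have hA : ∀ a ∈ List.take lo c, a.2.1 ≤ (k : Int) := by
        intro a ha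
        obtain ⟨j, hj, rfl⟩ := List.mem_take_iff_getElem.mp ha
        have hjc : j < c.length := by omega
        have hjlo : j < lo := by omega
        rcases hright with h0 | hend
        · omega
        · rcases Nat.lt_or_ge j (lo - 1) with hj1 | hj1
          · have hloc : lo - 1 < c.length := by omega
            have h1 := List.pairwise_iff_getElem.mp hpair j (lo - 1) hjc hloc hj1
            have h2 := hbelow (lo - 1) hloc (by omega)
            rw [List.getD_eq_getElem c _ hloc] at h2
            have h3 := hposc _ (List.getElem_mem hloc)
            omega
          · have hj2 : j = lo - 1 := by omega
            subst hj2
            rw [List.getD_eq_getElem c _ hjc] at hend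
            exact hend
      have hB : ∀ b ∈ List.drop lo c, (k : Int) + (term.toList.length : Int) ≤ b.1 := by
        intro b hb
        obtain ⟨j, hj, rfl⟩ := List.mem_drop_iff_getElem.mp hb
        have hjc : lo + j < c.length := by omega
        rcases hleft with hlen | hstart
        · omega
        · have hloc : lo < c.length := by omega
          rw [List.getD_eq_getElem c _ hloc] at hstart
          rcases Nat.eq_zero_or_pos j with hj0 | hjpos
          · subst hj0
            simpa using hstart
          · have h2 := List.pairwise_iff_getElem.mp (pvPairwise_lt c hpair hposc) lo (lo + j)
              hloc hjc (by omega)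
            omega
      have hpairc : List.Pairwise (fun a b => a.2.1 ≤ b.1) (List.take lo c)
          ∧ List.Pairwise (fun a b => a.2.1 ≤ b.1) (List.drop lo c)
          ∧ ∀ a ∈ List.take lo c, ∀ b ∈ List.drop lo c, a.2.1 ≤ b.1 := by
        have h := hpair
        rw [← List.take_append_drop lo c, List.pairwise_append] at h
        exact h
      refine ⟨?_, ?_, ?_, ?_⟩
      · -- permutation
        refine List.perm_middle.trans ?_
        rw [List.take_append_drop lo c]
        exact (hperm.cons _).trans (List.perm_append_singleton _ _).symm
      · -- pairwise disjoint sorted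
        rw [List.pairwise_append]
        refine ⟨hpairc.1, ?_, ?_⟩
        · rw [List.pairwise_cons]
          exact ⟨fun b hb => hB b hb, hpairc.2.1⟩
        · intro a ha b hb
          rcases List.mem_cons.mp hb with rfl | hb2
          · exact hA a ha
          · exact hpairc.2.2 a ha b hb2
      · -- positivity
        intro x hx
        rcases List.mem_append.mp hx with hx1 | hx2
        · exact hpos x (List.take_subset lo c hx1)
        · rcases List.mem_cons.mp hx2 with rfl | hx3
          · constructor
            · simp
            · omega
          · exact hpos x (List.drop_subset lo c hx3)
      · -- covered set
        intro i'
        rw [PySem.Set.contains_iff, PySem.Set.mem_update, ← PySem.Set.contains_iff, hu i']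
        rw [PySem.List.mem_pyRange_one]
        constructor
        · rintro (⟨x, hx, h1, h2⟩ | hr)
          · exact ⟨x, List.mem_append_left _ hx, h1, h2⟩
          · exact ⟨_, List.mem_append_right _ (List.mem_singleton.mpr rfl), by simpa using hr⟩
        · rintro ⟨x, hx, h1, h2⟩
          rcases List.mem_append.mp hx with hx1 | hx2
          · exact Or.inl ⟨x, hx1, h1, h2⟩
          · rcases List.mem_singleton.mp hx2 with rfl
            right
            simpa using ⟨h1, h2⟩
    · rw [if_neg hbd, if_neg hbd]
      exact ⟨hperm, hpair, hpos, hu⟩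

theorem pvFoldCand_pres (t : List Char) (term : String) (hne : term ≠ "") (cand : List Nat)
    (ms : List (Int × Int × String)) (u : PySem.Set Int) (c : List (Int × Int × String))
    (hinv : pvInv ms u c) :
    pvInv (cand.foldl (pvStepA t term.toList) (ms, u)).1
      (cand.foldl (pvStepA t term.toList) (ms, u)).2 (cand.foldl (pvStepB t term) c) := by
  induction cand generalizing ms u c with
  | nil => exact hinv
  | cons k ks ih =>
    rw [List.foldl_cons, List.foldl_cons]
    have h := pvStep_pres t term hne k ms u c hinv
    have h2 := ih (pvStepA t term.toList (ms, u) k).1 (pvStepA t term.toList (ms, u) k).2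
      (pvStepB t term c k) h
    simpa using h2

theorem pvOuter_pres (t : List Char) (allTerms : List String) (terms : List String)
    (ms : List (Int × Int × String)) (u : PySem.Set Int) (c : List (Int × Int × String)) :
    (∀ x ∈ terms, x ∈ allTerms) → (∀ x ∈ terms, x ≠ "") → pvInv ms u c →
    pvInv ((terms.foldl (fun (st : List (Int × Int × String) × PySem.Set Int) term =>
        if term.toList.length > t.length then st
        else pvAWhile t term.toList st.1 st.2 0) (ms, u)).1)
      ((terms.foldl (fun (st : List (Int × Int × String) × PySem.Set Int) term =>
        if term.toList.length > t.length then st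
        else pvAWhile t term.toList st.1 st.2 0) (ms, u)).2)
      (terms.foldl (fun chosen term =>
        ((((pvLengths allTerms t.length).foldl (pvOccStep allTerms t) (PySem.Dict.mk [])).getD
            term []).foldl
          (fun chosen i =>
            let e := i + (term.toList.length : Int)
            if pvBefore t i && pvAfter t e then pvInsertMatch chosen i e term else chosen)
          chosen)) c) := by
  induction terms generalizing ms u c with
  | nil => exact fun _ _ hinv => hinv
  | cons term ts ih =>
    intro hsub hne hinv
    rw [List.foldl_cons, List.foldl_cons]
    have hmem := hsub term (by simp)
    have hterm_ne := hne term (by simp)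
    have hocc := pvOcc_getD allTerms t term hmem hterm_ne
    by_cases hgt : term.toList.length > t.length
    · rw [if_pos hgt, hocc, if_neg (by omega), List.foldl_nil]
      exact ih ms u c (fun x hx => hsub x (List.mem_cons_of_mem _ hx))
        (fun x hx => hne x (List.mem_cons_of_mem _ hx)) hinv
    · rw [if_neg hgt, pvAWhile_eq_foldl, hocc, if_pos (by omega), List.foldl_map]
      have h1 := pvFoldCand_pres t term hterm_ne (pvCandFrom t term.toList 0) ms u c hinv
      exact ih _ _ _ (fun x hx => hsub x (List.mem_cons_of_mem _ hx))
        (fun x hx => hne x (List.mem_cons_of_mem _ hx)) h1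

theorem pvAssemble (text : String) (vocab : List (String × String × String))
    (ms : List (Int × Int × String)) (u : PySem.Set Int) (c : List (Int × Int × String))
    (hinv : pvInv ms u c) :
    (if ms = [] then [["text", text]]
      else pvEmit text vocab (PySem.List.sorted ms (fun m => m.1)))
    = (if c = [] then [["text", text]] else pvEmit text vocab c) := by
  obtain ⟨hperm, hpair, hpos, hu⟩ := hinv
  by_cases hms : ms = []
  · subst hms
    have hc : c = [] := List.Perm.eq_nil hperm
    rw [if_pos rfl, if_pos hc]
  · have hc : c ≠ [] := by
      intro h
      subst h
      exact hms (List.Perm.eq_nil hperm.symm)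
    rw [if_neg hms, if_neg hc]
    rw [PySem.List.sorted_eq_of_perm_of_pairwise_lt ms c (fun m => m.1) hperm
      (pvPairwise_lt c hpair (fun x hx => (hpos x hx).2))]

-- ===== VERDICT (by name: the statement is the Claim_ definition above) =====
theorem annotate_text_node_spec : Claim_equal_annotate_text_node := by
  intro text vocab sorted_terms hdom hpre
  unfold Spec_annotate_text_node
  simp only [annotate_text_node, annotate_text_node_alt]
  by_cases hblank : text = "" ∨ PySem.Str.strip text = ""
  · rw [if_pos hblank, if_pos hblank]
  · rw [if_neg hblank, if_neg hblank]
    have hne : ∀ x ∈ sorted_terms, x ≠ "" := by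
      rcases hpre with h | h | h
      · exact absurd (Or.inl h) hblank
      · exact absurd (Or.inr h) hblank
      · exact fun x hx => (h x hx).1
    have hinv0 : pvInv [] PySem.Set.empty [] := by
      refine ⟨List.Perm.refl [], List.Pairwise.nil, by simp, ?_⟩
      intro i
      rw [show (PySem.Set.empty : PySem.Set Int).contains i = false from rfl]
      simp
    have hinv := pvOuter_pres text.toList sorted_terms sorted_terms [] PySem.Set.empty []
      (fun x hx => hx) hne hinv0
    exact pvAssemble text vocab _ _ _ hinv
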